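-- pv_equiv track=rewrite | github.com/Janecjy/Transformer-training | utils.py | check_continuous_pattern
-- ===== SOURCE A (Python) =====
-- def check_continuous_pattern(tokens):
--     increases, decreases = 0, 0
--
--     # Loop over the token positions
--     for i in range(len(tokens) - 2):
--         # Check for a continuous increase
--         if tokens[i] < tokens[i + 1] < tokens[i + 2]:
--             increases += 1
--         # Check for a continuous decrease
--         elif tokens[i] > tokens[i + 1] > tokens[i + 2]:
--             decreases += 1
--
--     return increases, decreases
-- ===== SOURCE B (Python) =====
-- def check_continuous_pattern(tokens):
--     # Sign table of consecutive pairs, then one zip pass over adjacent signs.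
--     signs = [(a < b) - (a > b) for a, b in zip(tokens, tokens[1:])]
--     increases = sum(1 for x, y in zip(signs, signs[1:]) if x == 1 == y)
--     decreases = sum(1 for x, y in zip(signs, signs[1:]) if x == -1 == y)
--     return increases, decreases
-- ===== Notes on version B (the rewrite author's own statement) =====
-- stated objective: alternative
-- what changed: B replaces A's direct chained-comparison triple test over indices with an intermediate sign table of consecutive pairs plus one pass over adjacent sign pairs counted via zip/sum.
import Mathlib
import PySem

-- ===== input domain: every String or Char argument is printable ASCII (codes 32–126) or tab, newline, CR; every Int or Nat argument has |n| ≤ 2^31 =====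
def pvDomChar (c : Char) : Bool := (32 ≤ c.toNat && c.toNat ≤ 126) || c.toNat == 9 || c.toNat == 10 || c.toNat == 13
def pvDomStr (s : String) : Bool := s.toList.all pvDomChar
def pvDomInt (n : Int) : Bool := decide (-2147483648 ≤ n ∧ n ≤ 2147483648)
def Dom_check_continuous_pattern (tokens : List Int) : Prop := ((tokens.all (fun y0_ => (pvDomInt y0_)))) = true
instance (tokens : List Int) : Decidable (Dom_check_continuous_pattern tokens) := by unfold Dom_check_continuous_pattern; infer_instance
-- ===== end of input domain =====

-- B counts increasing/decreasing triples via a sign table of consecutive pairs instead of A's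
-- chained triple comparisons over indices; same O(n) cost (objective: alternative).

-- ===== PORT A =====
-- loop body of A's 'for i in range(len(tokens) - 2)'
def ccpStep (tokens : List Int) (s : Int × Int) (i : Int) : Int × Int :=
  if PySem.List.pyGetD tokens i 0 < PySem.List.pyGetD tokens (i+1) 0 ∧
     PySem.List.pyGetD tokens (i+1) 0 < PySem.List.pyGetD tokens (i+2) 0 then (s.1 + 1, s.2)
  else if PySem.List.pyGetD tokens i 0 > PySem.List.pyGetD tokens (i+1) 0 ∧
          PySem.List.pyGetD tokens (i+1) 0 > PySem.List.pyGetD tokens (i+2) 0 then (s.1, s.2 + 1)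
  else s

def check_continuous_pattern (tokens : List Int) : Int × Int :=
  (PySem.List.pyRange 0 ((tokens.length : Int) - 2) 1).foldl (ccpStep tokens) (0, 0)

-- ===== PORT B =====
-- (a < b) - (a > b)
def ccpSign (a b : Int) : Int := (if a < b then 1 else 0) - (if a > b then 1 else 0)

def check_continuous_pattern_alt (tokens : List Int) : Int × Int :=
  let signs := (tokens.zip (PySem.List.slice tokens (some 1) none)).map (fun p => ccpSign p.1 p.2)
  let pairs := signs.zip (PySem.List.slice signs (some 1) none)
  (((pairs.filter (fun p => p.1 == 1 && p.2 == 1)).length : Int),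
   ((pairs.filter (fun p => p.1 == -1 && p.2 == -1)).length : Int))

-- ===== PRECONDITION & SPEC =====
def Spec_check_continuous_pattern (tokens : List Int) (out : Int × Int) : Prop := out = check_continuous_pattern_alt tokens
instance (tokens : List Int) (out : Int × Int) : Decidable (Spec_check_continuous_pattern tokens out) := by unfold Spec_check_continuous_pattern; infer_instance

-- ===== CLAIM (what is proved, stated in full; the proofs are below) =====
def Claim_equal_check_continuous_pattern : Prop := ∀ (tokens : List Int), Dom_check_continuous_pattern tokens → Spec_check_continuous_pattern tokens (check_continuous_pattern tokens)

-- ===== LEMMAS AND PROOFS =====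

-- reference recursion on the list structure, used only in the proofs
def ccpRef : List Int → Int × Int
  | a :: b :: c :: rest =>
      let s := ccpRef (b :: c :: rest)
      if a < b ∧ b < c then (s.1 + 1, s.2)
      else if a > b ∧ b > c then (s.1, s.2 + 1)
      else s
  | _ => (0, 0)

theorem ccpRef_cons (a b c : Int) (rest : List Int) :
    ccpRef (a :: b :: c :: rest)
      = (if a < b ∧ b < c then ((ccpRef (b :: c :: rest)).1 + 1, (ccpRef (b :: c :: rest)).2)
         else if a > b ∧ b > c then ((ccpRef (b :: c :: rest)).1, (ccpRef (b :: c :: rest)).2 + 1)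
         else ccpRef (b :: c :: rest)) := rfl

theorem ccpStep_add (tokens : List Int) (s : Int × Int) (i : Int) :
    ccpStep tokens s i = (s.1 + (ccpStep tokens (0,0) i).1, s.2 + (ccpStep tokens (0,0) i).2) := by
  unfold ccpStep; split_ifs <;> simp

theorem foldl_ccpStep_shift (tokens : List Int) (l : List Int) (s : Int × Int) :
    l.foldl (ccpStep tokens) s
      = (s.1 + (l.foldl (ccpStep tokens) (0,0)).1, s.2 + (l.foldl (ccpStep tokens) (0,0)).2) := by
  induction l generalizing s with
  | nil => simp
  | cons x l ih =>
      simp only [List.foldl_cons]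
      rw [ih (ccpStep tokens s x), ih (ccpStep tokens (0,0) x), ccpStep_add tokens s x]
      simp only [Prod.mk.injEq]
      constructor <;> ring

theorem pyGetD_cons_shift (a d : Int) (xs : List Int) (i : Int) (hi : 0 ≤ i) :
    PySem.List.pyGetD (a :: xs) (i + 1) d = PySem.List.pyGetD xs i d := by
  obtain ⟨n, rfl⟩ := Int.eq_ofNat_of_zero_le hi
  have h : (n : Int) + 1 = ((n + 1 : Nat) : Int) := by push_cast; ring
  rw [h, PySem.List.pyGetD_natCast, PySem.List.pyGetD_natCast]
  simp [List.getD]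

theorem ccpStep_cons (a : Int) (xs : List Int) (j : Nat) (s : Int × Int) :
    ccpStep (a :: xs) s (1 + (j : Int)) = ccpStep xs s (j : Int) := by
  have e1 : (1 : Int) + (j : Int) = (j : Int) + 1 := by ring
  have e2 : (j : Int) + 1 + 2 = ((j : Int) + 1 + 1) + 1 := by ring
  unfold ccpStep
  rw [e1, e2,
      pyGetD_cons_shift a 0 xs ((j : Int) + 1 + 1) (by positivity),
      pyGetD_cons_shift a 0 xs ((j : Int) + 1) (by positivity),
      pyGetD_cons_shift a 0 xs (j : Int) j.cast_nonneg]
  have e3 : (j : Int) + 1 + 1 = (j : Int) + 2 := by ring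
  rw [e3]

theorem foldl_shiftRange (a : Int) (xs : List Int) (m : Nat) (s : Int × Int) :
    (PySem.List.pyRange 1 ((m : Int) + 1) 1).foldl (ccpStep (a :: xs)) s
      = (PySem.List.pyRange 0 (m : Int) 1).foldl (ccpStep xs) s := by
  induction m generalizing s with
  | zero =>
      rw [PySem.List.pyRange_one_eq_nil (by norm_num), PySem.List.pyRange_one_eq_nil (by norm_num)]
      rfl
  | succ m ih =>
      have hsr1 : PySem.List.pyRange 1 (((m + 1 : Nat) : Int) + 1) 1
          = PySem.List.pyRange 1 ((m : Int) + 1) 1 ++ [(m : Int) + 1] := by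
        have e : ((m + 1 : Nat) : Int) + 1 = ((m : Int) + 1) + 1 := by push_cast; ring
        rw [e, PySem.List.pyRange_one_succ_right (by omega)]
      have hsr0 : PySem.List.pyRange 0 ((m + 1 : Nat) : Int) 1
          = PySem.List.pyRange 0 (m : Int) 1 ++ [(m : Int)] := by
        have e : ((m + 1 : Nat) : Int) = (m : Int) + 1 := by push_cast; ring
        rw [e, PySem.List.pyRange_one_succ_right m.cast_nonneg]
      rw [hsr1, hsr0, List.foldl_append, List.foldl_append, ih s]
      simp only [List.foldl_cons, List.foldl_nil]
      have e : (m : Int) + 1 = 1 + (m : Int) := by ring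
      rw [e, ccpStep_cons]

theorem A_eq_ref (tokens : List Int) : check_continuous_pattern tokens = ccpRef tokens := by
  induction tokens with
  | nil => simp [check_continuous_pattern, ccpRef, PySem.List.pyRange_one_eq_nil]
  | cons a xs ih =>
      match xs, ih with
      | [], _ => simp [check_continuous_pattern, ccpRef, PySem.List.pyRange_one_eq_nil]
      | [b], _ => simp [check_continuous_pattern, ccpRef, PySem.List.pyRange_one_eq_nil]
      | b :: c :: rest, ih =>
        have hlen : ((a :: b :: c :: rest).length : Int) - 2 = ((rest.length : Nat) : Int) + 1 := by
          simp; ring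
        have hlen2 : ((b :: c :: rest).length : Int) - 2 = ((rest.length : Nat) : Int) := by
          simp; ring
        have hz : (0 : Int) + 1 = 1 := by ring
        unfold check_continuous_pattern
        rw [hlen, PySem.List.pyRange_one_cons (by positivity), List.foldl_cons, hz,
            foldl_shiftRange, foldl_ccpStep_shift, ← hlen2]
        have h0 : ccpStep (a :: b :: c :: rest) (0,0) 0
            = if a < b ∧ b < c then ((1:Int), (0:Int)) else if a > b ∧ b > c then (0, 1) else (0,0) := by
          unfold ccpStep
          norm_num [PySem.List.pyGetD_ofNat']
        rw [h0]
        unfold check_continuous_pattern at ih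
        rw [ih]
        rw [ccpRef_cons]
        split_ifs <;> simp [Prod.ext_iff] <;> omega

-- B-side: the sign table and the pair count, as recursions

theorem signs_cons (a b : Int) (xs : List Int) :
    ((a :: b :: xs).zip (PySem.List.slice (a :: b :: xs) (some 1) none)).map (fun p => ccpSign p.1 p.2)
      = ccpSign a b :: ((b :: xs).zip (PySem.List.slice (b :: xs) (some 1) none)).map (fun p => ccpSign p.1 p.2) := by
  simp only [PySem.List.slice_from_one, List.tail_cons, List.zip_cons_cons, List.map_cons]

-- the pair-counting half of B, as a function of the sign list
def pcount (signs : List Int) : Int × Int :=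
  ((((signs.zip (PySem.List.slice signs (some 1) none)).filter (fun p => p.1 == 1 && p.2 == 1)).length : Int),
   (((signs.zip (PySem.List.slice signs (some 1) none)).filter (fun p => p.1 == -1 && p.2 == -1)).length : Int))

theorem B_def (tokens : List Int) :
    check_continuous_pattern_alt tokens
      = pcount ((tokens.zip (PySem.List.slice tokens (some 1) none)).map (fun p => ccpSign p.1 p.2)) := rfl

theorem pcount_cons (x y : Int) (l : List Int) :
    pcount (x :: y :: l)
      = ((if x == 1 && y == 1 then 1 else 0) + (pcount (y :: l)).1,
         (if x == -1 && y == -1 then 1 else 0) + (pcount (y :: l)).2) := by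
  unfold pcount
  simp only [PySem.List.slice_from_one, List.tail_cons, List.zip_cons_cons, List.filter_cons]
  by_cases hp : (x == 1 && y == 1) = true <;> by_cases hm : (x == -1 && y == -1) = true
  · exfalso
    simp only [Bool.and_eq_true, beq_iff_eq] at hp hm
    omega
  · simp [hp, hm, Prod.ext_iff]
    omega
  · simp [hp, hm, Prod.ext_iff]
    omega
  · simp [hp, hm]

theorem ccpSign_eq_one (a b : Int) : (ccpSign a b == 1) = decide (a < b) := by
  unfold ccpSign
  by_cases h : a < b
  · simp [h, not_lt_of_gt h]
  · by_cases h2 : b < a <;> simp [h, h2]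

theorem ccpSign_eq_neg_one (a b : Int) : (ccpSign a b == -1) = decide (a > b) := by
  unfold ccpSign
  by_cases h : a < b
  · simp [h, not_lt_of_gt h]
  · by_cases h2 : b < a <;> simp [h, h2]

theorem B_eq_ref (tokens : List Int) : check_continuous_pattern_alt tokens = ccpRef tokens := by
  induction tokens with
  | nil => rfl
  | cons a xs ih =>
      match xs, ih with
      | [], _ => rfl
      | [b], _ => rfl
      | b :: c :: rest, ih =>
        rw [B_def, signs_cons, signs_cons, pcount_cons, ← signs_cons, ← B_def, ih,
            ccpSign_eq_one, ccpSign_eq_one, ccpSign_eq_neg_one, ccpSign_eq_neg_one, ccpRef_cons]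
        by_cases h1 : a < b ∧ b < c
        · simp [h1, not_lt_of_gt h1.1, not_lt_of_gt h1.2, Prod.ext_iff]
          omega
        · by_cases h2 : a > b ∧ b > c
          · simp [h2, not_lt_of_gt h2.1, not_lt_of_gt h2.2, Prod.ext_iff]
            omega
          · rcases not_and_or.mp h1 with h | h <;> rcases not_and_or.mp h2 with h' | h' <;>
              simp [h, h']

-- ===== VERDICT (by name: the statement is the Claim_ definition above) =====
theorem check_continuous_pattern_spec : Claim_equal_check_continuous_pattern := by
  intro tokens _
  show check_continuous_pattern tokens = check_continuous_pattern_alt tokens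
  rw [A_eq_ref, B_eq_ref]
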